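-- pv_equiv track=rewrite | github.com/genomehubs/genomehubs | src/genomehubs/lib/utils.py | set_headers
-- ===== SOURCE A (Python) =====
-- from typing import IO, Any, Callable, Optional, Union
--
-- def set_headers(config: dict[str, Any]) -> list[str]:
--     """
--     Retrieves a list of all headers defined in the "attributes", "identifiers",
--     "metadata", "names", and "taxonomy" sections of the provided configuration.
--
--     Args:
--         config (dict): The configuration dictionary containing the section data.
--
--     Returns:
--         list: A list of all unique headers found in the specified sections.
--     """
--     headers: list[str] = []
--     for section in ["attributes", "identifiers", "metadata", "names", "taxonomy"]:
--         for key, value in config.get(section, {}).items():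
--             if isinstance(value, dict):
--                 if "header" in value and value["header"] not in headers:
--                     headers.append(value["header"])
--     return headers
-- ===== SOURCE B (Python) =====
-- def set_headers(config):
--     """Gather all candidate headers flat, then deduplicate with a recursive
--     sieve: keep the head and recurse on the tail with all copies of the head
--     filtered out (no seen-set / membership accumulator)."""
--     candidates = [
--         value["header"]
--         for section in ["attributes", "identifiers", "metadata", "names", "taxonomy"]
--         for value in config.get(section, {}).values()
--         if isinstance(value, dict) and "header" in value
--     ]
--
--     def sieve(xs):
--         if not xs:
--             return []
--         head = xs[0]
--         return [head] + sieve([x for x in xs[1:] if x != head])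
--
--     return sieve(candidates)
-- ===== Notes on version B (the rewrite author's own statement) =====
-- stated objective: alternative
-- what changed: B gathers all candidate headers in one flat comprehension and then deduplicates by a recursive sieve that keeps each head and filters every later copy of it out of the remainder, instead of A's single accumulating loop that tests membership in the growing result list.
import Mathlib
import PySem

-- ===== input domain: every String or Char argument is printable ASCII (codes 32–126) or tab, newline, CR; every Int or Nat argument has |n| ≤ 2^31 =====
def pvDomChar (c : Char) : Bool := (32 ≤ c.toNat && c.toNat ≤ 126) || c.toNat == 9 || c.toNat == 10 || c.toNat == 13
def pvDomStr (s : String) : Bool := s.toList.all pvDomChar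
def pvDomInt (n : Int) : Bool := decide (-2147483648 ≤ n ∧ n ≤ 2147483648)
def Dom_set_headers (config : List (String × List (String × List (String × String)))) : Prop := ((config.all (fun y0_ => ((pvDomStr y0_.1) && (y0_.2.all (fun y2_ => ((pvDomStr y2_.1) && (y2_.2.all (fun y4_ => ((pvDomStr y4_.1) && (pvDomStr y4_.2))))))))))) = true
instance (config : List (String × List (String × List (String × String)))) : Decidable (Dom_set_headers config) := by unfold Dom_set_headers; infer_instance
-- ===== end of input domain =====

-- B gathers headers flat and deduplicates with a recursive filter-out-the-head sieve
-- instead of A's accumulating loop with a membership guard (objective: alternative).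

-- ===== PORT A =====
-- A: one accumulator list, appending while scanning each section, with an in-loop
-- 'not in headers' membership guard.
def set_headers (config : List (String × List (String × List (String × String)))) : List String :=
  ["attributes", "identifiers", "metadata", "names", "taxonomy"].foldl
    (fun headers sec =>
      ((PySem.Dict.mk config).getD sec []).foldl
        (fun headers kv =>
          -- 'if "header" in value and value["header"] not in headers: headers.append(...)'
          match (PySem.Dict.mk kv.2).get? "header" with
          | some h => if h ∉ headers then headers ++ [h] else headers
          | none => headers)
        headers)
    []

-- ===== PORT B =====
-- B's sieve: keep the head, recurse on the tail with every copy of the head removed.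
def pvSieve : List String → List String
  | [] => []
  | h :: t => h :: pvSieve (t.filter (fun x => x ≠ h))
termination_by xs => xs.length
decreasing_by
  simp only [List.length_unattach, List.length_cons]
  exact Nat.lt_succ_of_le (le_trans (List.length_filter_le _ _) (Nat.le_of_eq (List.length_attach ..)))

-- B: flat gather (list comprehension), then the recursive sieve.
def set_headers_alt (config : List (String × List (String × List (String × String)))) : List String :=
  let candidates :=
    ["attributes", "identifiers", "metadata", "names", "taxonomy"].flatMap
      (fun sec =>
        ((PySem.Dict.mk config).getD sec []).filterMap
          (fun kv => (PySem.Dict.mk kv.2).get? "header"))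
  pvSieve candidates

-- ===== PRECONDITION & SPEC =====
def Spec_set_headers (config : List (String × List (String × List (String × String)))) (out : List String) : Prop := out = set_headers_alt config
instance (config : List (String × List (String × List (String × String)))) (out : List String) : Decidable (Spec_set_headers config out) := by unfold Spec_set_headers; infer_instance

-- ===== CLAIM (what is proved, stated in full; the proofs are below) =====
def Claim_equal_set_headers : Prop := ∀ (config : List (String × List (String × List (String × String)))), Dom_set_headers config → Spec_set_headers config (set_headers config)

-- ===== LEMMAS AND PROOFS =====

-- A's append-if-new step is PySem.Set.add
theorem step_eq_set_add (hs : List String) (h : String) :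
    (if h ∉ hs then hs ++ [h] else hs) = PySem.Set.add hs h := by
  rw [PySem.Set.add_eq_ite]
  by_cases hm : h ∈ hs <;> simp [hm]

-- A's inner loop over one section is a Set.update by that section's headers
theorem inner_eq (l : List (String × List (String × String))) (acc : List String) :
    l.foldl
        (fun headers kv =>
          match (PySem.Dict.mk kv.2).get? "header" with
          | some h => if h ∉ headers then headers ++ [h] else headers
          | none => headers)
        acc
      = PySem.Set.update acc (l.filterMap (fun kv => (PySem.Dict.mk kv.2).get? "header")) := by
  induction l generalizing acc with
  | nil => rfl
  | cons x t ih =>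
    rw [List.foldl_cons, List.filterMap_cons]
    cases hfx : (PySem.Dict.mk x.2).get? "header" with
    | none => exact ih acc
    | some h =>
      rw [PySem.Set.update_cons, show (match some h with
          | some h => if h ∉ acc then acc ++ [h] else acc
          | none => acc) = PySem.Set.add acc h from step_eq_set_add acc h]
      exact ih _

-- a fold of Set.update over the pieces is one Set.update over the flattened list
theorem foldl_update_eq_update_flatMap {α : Type} (F : α → List String)
    (secs : List α) (s : PySem.Set String) :
    secs.foldl (fun s x => PySem.Set.update s (F x)) s
      = PySem.Set.update s (secs.flatMap F) := by
  induction secs generalizing s with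
  | nil => simp [PySem.Set.update]
  | cons x t ih => simp [List.flatMap_cons, ih, PySem.Set.update_append]

-- elements already in the accumulator can be filtered out of the update list
theorem update_filter_of_mem (x : String) (l : List String) (acc : List String)
    (hx : x ∈ acc) :
    PySem.Set.update acc (l.filter (fun y => y ≠ x)) = PySem.Set.update acc l := by
  induction l generalizing acc with
  | nil => rfl
  | cons y t ih =>
    by_cases hy : y = x
    · subst hy
      simp only [List.filter_cons, ne_eq, not_true_eq_false, decide_false]
      rw [PySem.Set.update_cons, PySem.Set.add_eq_ite, if_pos hx]
      exact ih acc hx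
    · rw [List.filter_cons, if_pos (by simpa using hy), PySem.Set.update_cons,
        PySem.Set.update_cons]
      exact ih _ (by rw [PySem.Set.add_eq_ite]; split <;> simp [hx])

-- a head absent from the update list commutes out of the accumulator
theorem update_cons_acc (x : String) (l : List String) (acc : List String)
    (hx : x ∉ l) :
    PySem.Set.update (x :: acc) l = x :: PySem.Set.update acc l := by
  induction l generalizing acc with
  | nil => rfl
  | cons y t ih =>
    have hyx : y ≠ x := fun h => hx (h ▸ List.mem_cons_self)
    rw [PySem.Set.update_cons, PySem.Set.update_cons]
    have : PySem.Set.add (x :: acc) y = x :: PySem.Set.add acc y := by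
      rw [PySem.Set.add_eq_ite, PySem.Set.add_eq_ite]
      by_cases hm : y ∈ acc
      · simp [hm]
      · simp [hm, hyx]
    rw [this]
    exact ih _ (fun h => hx (List.mem_cons_of_mem _ h))

-- the sieve computes exactly Python's first-occurrence dedup (= set-building)
theorem sieve_eq_ofList (xs : List String) :
    pvSieve xs = PySem.Set.ofList xs := by
  induction hn : xs.length using Nat.strong_induction_on generalizing xs with
  | _ n ih =>
    cases xs with
    | nil => rw [pvSieve.eq_def]; rfl
    | cons x t =>
      have hstep : pvSieve (x :: t) = x :: pvSieve (t.filter (fun y => y ≠ x)) := by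
        rw [pvSieve.eq_def]
      rw [hstep]
      have hlen : (t.filter (fun y => y ≠ x)).length < n := by
        subst hn
        exact Nat.lt_succ_of_le (List.length_filter_le _ _)
      rw [ih _ hlen _ rfl]
      show x :: PySem.Set.ofList (t.filter (fun y => y ≠ x))
          = PySem.Set.update PySem.Set.empty (x :: t)
      rw [PySem.Set.update_cons]
      have hadd : PySem.Set.add PySem.Set.empty x = [x] := by
        rw [PySem.Set.add_eq_ite]; simp [PySem.Set.empty]
      rw [hadd, ← update_filter_of_mem x t [x] (List.mem_singleton.mpr rfl),
        update_cons_acc x _ [] (by simp)]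
      rfl

-- ===== VERDICT (by name: the statement is the Claim_ definition above) =====
theorem set_headers_spec : Claim_equal_set_headers := by
  intro config _
  unfold Spec_set_headers set_headers set_headers_alt
  rw [sieve_eq_ofList,
    show ∀ l : List String, PySem.Set.ofList l = PySem.Set.update [] l from fun _ => rfl,
    ← foldl_update_eq_update_flatMap]
  apply PySem.List.foldl_congr_mem
  intro acc sec _
  exact inner_eq _ acc
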